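-- pv_equiv track=rewrite | github.com/IchiroYoshida/python_public | astro/tide/python/old/tide40.py | day_serial
-- ===== SOURCE A (Python) =====
-- def day_serial(year,month,day):
--     d = 0
--     m = [31,31,28,31,30,31,30,31,31,30,31,30,31] # /* 各月の日数 */
--
--     if ((year % 4 == 0 and year % 100 !=0) or year % 400 == 0 ): # 閏年
--          m[2] = 29
--
--     for  i in range (1,month):
--          d += m[i]
--     d += day - 1
--
--     return d
-- ===== SOURCE B (Python) =====
-- def day_serial(year, month, day):
--     # days completed before the start of each month (month 13 = whole year)
--     days_before = {1: 0, 2: 31, 3: 59, 4: 90, 5: 120, 6: 151, 7: 181,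
--                    8: 212, 9: 243, 10: 273, 11: 304, 12: 334, 13: 365}
--     leap = (year % 4 == 0 and year % 100 != 0) or year % 400 == 0
--     return days_before.get(month, 0) + day - 1 + (1 if leap and month >= 3 else 0)
-- ===== Notes on version B (the rewrite author's own statement) =====
-- stated objective: idiomatic
-- what changed: Replaces the per-month summation loop over a mutable month-lengths list with a single O(1) lookup in a constant cumulative-days table plus an arithmetic leap adjustment for month >= 3; Pre_ excludes only month >= 14, where A raises IndexError.
import Mathlib
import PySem

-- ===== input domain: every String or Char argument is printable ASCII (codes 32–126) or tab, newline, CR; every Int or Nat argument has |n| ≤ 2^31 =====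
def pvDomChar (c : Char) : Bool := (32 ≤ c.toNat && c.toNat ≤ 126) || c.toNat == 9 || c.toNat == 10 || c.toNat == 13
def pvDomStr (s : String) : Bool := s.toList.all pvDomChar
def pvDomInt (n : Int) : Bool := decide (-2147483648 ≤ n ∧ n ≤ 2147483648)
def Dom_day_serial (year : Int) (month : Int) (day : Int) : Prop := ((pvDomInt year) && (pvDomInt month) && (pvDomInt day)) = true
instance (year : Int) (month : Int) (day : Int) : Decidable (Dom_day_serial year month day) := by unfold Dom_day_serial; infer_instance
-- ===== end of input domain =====

-- B replaces A's per-month summation loop by one lookup in a constant cumulative-days table (idiomatic/O(1)).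

-- ===== PORT A =====
def day_serial (year : Int) (month : Int) (day : Int) : Int :=
  let m : List Int := [31,31,28,31,30,31,30,31,31,30,31,30,31]
  let m := if (PySem.Int.mod year 4 == 0 && PySem.Int.mod year 100 != 0) || PySem.Int.mod year 400 == 0
           then PySem.List.pySetD m 2 29 else m
  let d := (PySem.List.pyRange 1 month 1).foldl (fun d i => d + PySem.List.pyGetD m i 0) 0
  d + day - 1

-- ===== PORT B =====
def day_serial_alt (year : Int) (month : Int) (day : Int) : Int :=
  let daysBefore : PySem.Dict Int Int :=
    PySem.Dict.ofList [(1,0),(2,31),(3,59),(4,90),(5,120),(6,151),(7,181),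
                       (8,212),(9,243),(10,273),(11,304),(12,334),(13,365)]
  let leap : Bool := (PySem.Int.mod year 4 == 0 && PySem.Int.mod year 100 != 0) || PySem.Int.mod year 400 == 0
  PySem.Dict.getD daysBefore month 0 + day - 1 + (if leap && month ≥ 3 then 1 else 0)

-- ===== PRECONDITION & SPEC =====
-- A raises IndexError for month >= 14 (the loop indexes past its 13-entry month table); Pre_ excludes exactly those inputs.
def Pre_day_serial (year : Int) (month : Int) (day : Int) : Prop := month ≤ 13
instance (year : Int) (month : Int) (day : Int) : Decidable (Pre_day_serial year month day) := by unfold Pre_day_serial; infer_instance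
def pvWitness_day_serial : Int × Int × Int := (2024, 3, 15)

def Spec_day_serial (year : Int) (month : Int) (day : Int) (out : Int) : Prop := out = day_serial_alt year month day
instance (year : Int) (month : Int) (day : Int) (out : Int) : Decidable (Spec_day_serial year month day out) := by unfold Spec_day_serial; infer_instance

-- ===== CLAIM (what is proved, stated in full; the proofs are below) =====
def Claim_equal_day_serial : Prop := ∀ (year : Int) (month : Int) (day : Int), Dom_day_serial year month day → Pre_day_serial year month day → Spec_day_serial year month day (day_serial year month day)

-- ===== LEMMAS AND PROOFS =====

-- ===== VERDICT (by name: the statement is the Claim_ definition above) =====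
theorem day_serial_spec : Claim_equal_day_serial := by
  intro year month day _ hpre
  unfold Pre_day_serial at hpre
  unfold Spec_day_serial day_serial day_serial_alt
  have hD : (PySem.Dict.ofList [(1,0),(2,31),(3,59),(4,90),(5,120),(6,151),(7,181),
                       (8,212),(9,243),(10,273),(11,304),(12,334),(13,365)] : PySem.Dict Int Int)
      = PySem.Dict.mk [(1,0),(2,31),(3,59),(4,90),(5,120),(6,151),(7,181),
                       (8,212),(9,243),(10,273),(11,304),(12,334),(13,365)] := by decide
  simp only [hD]
  by_cases hl : ((PySem.Int.mod year 4 == 0 && PySem.Int.mod year 100 != 0) || PySem.Int.mod year 400 == 0) = true <;>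
  · simp only [hl, if_true, Bool.false_and, Bool.true_and]
    by_cases h1 : month ≤ 0
    · rw [PySem.List.pyRange_one_eq_nil (by omega)]
      have hc : (PySem.Dict.mk [((1:Int),(0:Int)),(2,31),(3,59),(4,90),(5,120),(6,151),(7,181),
                       (8,212),(9,243),(10,273),(11,304),(12,334),(13,365)]).contains month = false := by
        simp; omega
      have h3 : ¬ (3 ≤ month) := by omega
      simp [PySem.Dict.getD_of_not_contains, hc, h3, List.foldl]
    · interval_cases month <;>
        simp [PySem.List.pyRange, PySem.List.pyGetD, PySem.List.pyGet?, PySem.List.pyIdx?,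
              PySem.List.pySetD, PySem.List.pySet?, List.set, List.foldl, List.range_succ,
              PySem.Dict.getD_eq_get?_getD, PySem.Dict.get?_mk_cons] <;> omega
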